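-- pv_equiv track=rewrite | github.com/isakchoe/TIL | algorithm /programmers/BF_모의고사.py | solution
-- ===== SOURCE A (Python) =====
-- def solution(answers):
--     answer = []
--
--     count_1 = 0
--     count_2 = 0
--     count_3 = 0
--     for i in range(len(answers)):
--         # 1번
--         if answers[i] == (i) % 5 + 1:
--             count_1 += 1
--         #         2번
--         if answers[i] == 2 and i % 2 == 0:
--             count_2 += 1
--
--         if i % 8 == 1 and answers[i] == 1 or i % 8 == 3 and answers[i] == 3 or i % 8 == 5 and answers[
--             i] == 4 or i % 8 == 7 and answers[i] == 5:
--             count_2 += 1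
--         #         3번
--
--         if (i % 10 == 0 or i % 10 == 1) and answers[i] == 3:
--             count_3 += 1
--
--         if (i % 10 == 2 or i % 10 == 3) and answers[i] == 1:
--             count_3 += 1
--
--         if (i % 10 == 4 or i % 10 == 5) and answers[i] == 2:
--             count_3 += 1
--         if (i % 10 == 6 or i % 10 == 7) and answers[i] == 4:
--             count_3 += 1
--         if (i % 10 == 8 or i % 10 == 9) and answers[i] == 5:
--             count_3 += 1
--
--     result = max(count_1, count_2, count_3)
--     temp = [count_1, count_2, count_3]
--
--
--     for i in range(3):
--         if temp[i] == result:
--             answer.append(i+1)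
--
--     return answer
-- ===== SOURCE B (Python) =====
-- def solution(answers):
--     # Aggregate first: histogram of (position mod 40, answer), 40 = lcm of the
--     # three pattern periods; each student's score is then a fixed 40-lookup sum.
--     hist = {}
--     for i, a in enumerate(answers):
--         key = (i % 40, a)
--         hist[key] = hist.get(key, 0) + 1
--     patterns = [[1, 2, 3, 4, 5],
--                 [2, 1, 2, 3, 2, 4, 2, 5],
--                 [3, 3, 1, 1, 2, 2, 4, 4, 5, 5]]
--     scores = [sum(hist.get((r, p[r % len(p)]), 0) for r in range(40))
--               for p in patterns]
--     best = max(scores)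
--     return [i + 1 for i, s in enumerate(scores) if s == best]
-- ===== Notes on version B (the rewrite author's own statement) =====
-- stated objective: alternative
-- what changed: Instead of comparing every answer against each student's pattern (A's three counters with arithmetic branch conditions per element), B first aggregates the input into a histogram keyed by (index mod 40, answer) -- 40 being the lcm of the three pattern periods -- and then computes each student's score as a fixed sum of 40 histogram lookups, so no per-element pattern comparison happens at all.
import Mathlib
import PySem

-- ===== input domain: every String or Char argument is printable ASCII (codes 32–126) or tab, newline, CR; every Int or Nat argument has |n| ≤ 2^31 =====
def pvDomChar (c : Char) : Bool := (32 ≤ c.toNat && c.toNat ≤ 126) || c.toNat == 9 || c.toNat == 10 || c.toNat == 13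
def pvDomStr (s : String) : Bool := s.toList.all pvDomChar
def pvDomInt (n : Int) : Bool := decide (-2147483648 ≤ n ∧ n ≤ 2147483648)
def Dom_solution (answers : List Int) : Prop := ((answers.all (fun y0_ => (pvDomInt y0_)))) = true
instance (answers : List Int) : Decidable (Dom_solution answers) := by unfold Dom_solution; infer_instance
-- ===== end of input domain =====

-- B aggregates the input into a histogram keyed by (index mod 40, answer) and scores each
-- student from 40 table lookups, instead of A's per-element branch comparisons (alternative, same O(n)).
-- ===== PORT A =====
-- Literal transliteration of A: range(len) loop with three counters and arithmetic branch conditions,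
-- then max + a range(3) loop over temp. (pyGetD with default 0 is exact: every index i is in range.)
def solutionStepA (answers : List Int) (c : Int × Int × Int) (i : Int) : Int × Int × Int :=
  let a := PySem.List.pyGetD answers i 0
  let c1 := if a = PySem.Int.mod i 5 + 1 then c.1 + 1 else c.1
  let c2 := if a = 2 ∧ PySem.Int.mod i 2 = 0 then c.2.1 + 1 else c.2.1
  let c2 := if (PySem.Int.mod i 8 = 1 ∧ a = 1) ∨ (PySem.Int.mod i 8 = 3 ∧ a = 3) ∨
               (PySem.Int.mod i 8 = 5 ∧ a = 4) ∨ (PySem.Int.mod i 8 = 7 ∧ a = 5) then c2 + 1 else c2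
  let c3 := if (PySem.Int.mod i 10 = 0 ∨ PySem.Int.mod i 10 = 1) ∧ a = 3 then c.2.2 + 1 else c.2.2
  let c3 := if (PySem.Int.mod i 10 = 2 ∨ PySem.Int.mod i 10 = 3) ∧ a = 1 then c3 + 1 else c3
  let c3 := if (PySem.Int.mod i 10 = 4 ∨ PySem.Int.mod i 10 = 5) ∧ a = 2 then c3 + 1 else c3
  let c3 := if (PySem.Int.mod i 10 = 6 ∨ PySem.Int.mod i 10 = 7) ∧ a = 4 then c3 + 1 else c3
  let c3 := if (PySem.Int.mod i 10 = 8 ∨ PySem.Int.mod i 10 = 9) ∧ a = 5 then c3 + 1 else c3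
  (c1, c2, c3)

def solution (answers : List Int) : List Int :=
  let s := (PySem.List.pyRange 0 (PySem.List.len answers) 1).foldl (solutionStepA answers) (0, 0, 0)
  let result := max s.1 (max s.2.1 s.2.2)
  let temp := [s.1, s.2.1, s.2.2]
  (PySem.List.pyRange 0 3 1).foldl
    (fun ans i => if PySem.List.pyGetD temp i 0 = result then ans ++ [i + 1] else ans) []

-- ===== PORT B =====
-- Literal transliteration of B: one pass builds hist = {(i % 40, a): multiplicity} via
-- hist[key] = hist.get(key, 0) + 1; each pattern's score is sum(hist.get((r, p[r % len(p)]), 0)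
-- for r in range(40)); then max and the winners' 1-based indices via enumerate.
-- (pyGetD with default 0 is exact: mod r len(p) is always in range.)
def solutionPatterns : List (List Int) := [[1, 2, 3, 4, 5], [2, 1, 2, 3, 2, 4, 2, 5], [3, 3, 1, 1, 2, 2, 4, 4, 5, 5]]

def solution_alt (answers : List Int) : List Int :=
  let hist := (PySem.List.enumerate answers).foldl
    (fun d x => d.insert (PySem.Int.mod x.1 40, x.2) (d.getD (PySem.Int.mod x.1 40, x.2) 0 + 1))
    (PySem.Dict.empty : PySem.Dict (Int × Int) Int)
  let scores := solutionPatterns.map (fun p =>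
    ((PySem.List.pyRange 0 40 1).map (fun r =>
        hist.getD (r, PySem.List.pyGetD p (PySem.Int.mod r (PySem.List.len p)) 0) 0)).sum)
  let best := (PySem.List.max? scores (fun x => x)).getD 0   -- scores is nonempty, so max? is some: exact
  (PySem.List.enumerate scores).filterMap (fun ic => if ic.2 = best then some (ic.1 + 1) else none)

-- ===== PRECONDITION & SPEC =====
def Spec_solution (answers : List Int) (out : List Int) : Prop := out = solution_alt answers
instance (answers : List Int) (out : List Int) : Decidable (Spec_solution answers out) := by unfold Spec_solution; infer_instance

-- ===== CLAIM (what is proved, stated in full; the proofs are below) =====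
def Claim_equal_solution : Prop := ∀ (answers : List Int), Dom_solution answers → Spec_solution answers (solution answers)

-- ===== LEMMAS AND PROOFS =====

-- Per-index agreement of A's branch conditions with the pattern value at that index.
lemma pv_c1 (i a c : Int) :
    (if a = PySem.Int.mod i 5 + 1 then c + 1 else c)
      = c + (if a = PySem.List.pyGetD [1, 2, 3, 4, 5] (PySem.Int.mod i 5) 0 then 1 else 0) := by
  rw [PySem.Int.mod_eq_emod_of_pos (by norm_num)]
  have h : i % 5 = 0 ∨ i % 5 = 1 ∨ i % 5 = 2 ∨ i % 5 = 3 ∨ i % 5 = 4 := by omega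
  rcases h with h|h|h|h|h <;> rw [h] <;>
    simp only [PySem.List.pyGetD_ofNat'] <;> norm_num <;>
    split_ifs <;> omega

lemma pv_c2 (i a c : Int) :
    (if (PySem.Int.mod i 8 = 1 ∧ a = 1) ∨ (PySem.Int.mod i 8 = 3 ∧ a = 3) ∨
        (PySem.Int.mod i 8 = 5 ∧ a = 4) ∨ (PySem.Int.mod i 8 = 7 ∧ a = 5)
      then (if a = 2 ∧ PySem.Int.mod i 2 = 0 then c + 1 else c) + 1
      else (if a = 2 ∧ PySem.Int.mod i 2 = 0 then c + 1 else c))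
      = c + (if a = PySem.List.pyGetD [2, 1, 2, 3, 2, 4, 2, 5] (PySem.Int.mod i 8) 0 then 1 else 0) := by
  rw [PySem.Int.mod_eq_emod_of_pos (b := 8) (by norm_num),
      PySem.Int.mod_eq_emod_of_pos (b := 2) (by norm_num)]
  have h : i % 8 = 0 ∨ i % 8 = 1 ∨ i % 8 = 2 ∨ i % 8 = 3 ∨ i % 8 = 4 ∨ i % 8 = 5 ∨ i % 8 = 6 ∨ i % 8 = 7 := by omega
  rcases h with h|h|h|h|h|h|h|h <;>
    (have h2 : i % 2 = i % 8 % 2 := by omega) <;> rw [h2, h] <;>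
    simp only [PySem.List.pyGetD_ofNat'] <;> norm_num <;>
    split_ifs <;> omega

lemma pv_c3 (i a c : Int) :
    (if (PySem.Int.mod i 10 = 8 ∨ PySem.Int.mod i 10 = 9) ∧ a = 5 then (if (PySem.Int.mod i 10 = 6 ∨ PySem.Int.mod i 10 = 7) ∧ a = 4 then (if (PySem.Int.mod i 10 = 4 ∨ PySem.Int.mod i 10 = 5) ∧ a = 2 then (if (PySem.Int.mod i 10 = 2 ∨ PySem.Int.mod i 10 = 3) ∧ a = 1 then (if (PySem.Int.mod i 10 = 0 ∨ PySem.Int.mod i 10 = 1) ∧ a = 3 then c + 1 else c) + 1 else (if (PySem.Int.mod i 10 = 0 ∨ PySem.Int.mod i 10 = 1) ∧ a = 3 then c + 1 else c)) + 1 else (if (PySem.Int.mod i 10 = 2 ∨ PySem.Int.mod i 10 = 3) ∧ a = 1 then (if (PySem.Int.mod i 10 = 0 ∨ PySem.Int.mod i 10 = 1) ∧ a = 3 then c + 1 else c) + 1 else (if (PySem.Int.mod i 10 = 0 ∨ PySem.Int.mod i 10 = 1) ∧ a = 3 then c + 1 else c))) + 1 else (if (PySem.Int.mod i 10 = 4 ∨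 PySem.Int.mod i 10 = 5) ∧ a = 2 then (if (PySem.Int.mod i 10 = 2 ∨ PySem.Int.mod i 10 = 3) ∧ a = 1 then (if (PySem.Int.mod i 10 = 0 ∨ PySem.Int.mod i 10 = 1) ∧ a = 3 then c + 1 else c) + 1 else (if (PySem.Int.mod i 10 = 0 ∨ PySem.Int.mod i 10 = 1) ∧ a = 3 then c + 1 else c)) + 1 else (if (PySem.Int.mod i 10 = 2 ∨ PySem.Int.mod i 10 = 3) ∧ a = 1 then (if (PySem.Int.mod i 10 = 0 ∨ PySem.Int.mod i 10 = 1) ∧ a = 3 then c + 1 else c) + 1 else (if (PySem.Int.mod i 10 = 0 ∨ PySem.Int.mod i 10 = 1) ∧ a = 3 then c + 1 else c)))) + 1 else (if (PySem.Int.mod i 10 = 6 ∨ PySem.Int.mod i 10 = 7) ∧ a = 4 then (if (PySem.Int.mod i 10 = 4 ∨ PySem.Int.mod i 10 = 5) ∧ a = 2 then (if (PySem.Int.mod i 10 = 2 ∨ PySem.Int.mod i 10 = 3) ∧ a = 1 then (if (PySem.Int.mod i 10 = 0 ∨ PySem.Int.mod i 10 = 1) ∧ a = 3 then c + 1 else c)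 + 1 else (if (PySem.Int.mod i 10 = 0 ∨ PySem.Int.mod i 10 = 1) ∧ a = 3 then c + 1 else c)) + 1 else (if (PySem.Int.mod i 10 = 2 ∨ PySem.Int.mod i 10 = 3) ∧ a = 1 then (if (PySem.Int.mod i 10 = 0 ∨ PySem.Int.mod i 10 = 1) ∧ a = 3 then c + 1 else c) + 1 else (if (PySem.Int.mod i 10 = 0 ∨ PySem.Int.mod i 10 = 1) ∧ a = 3 then c + 1 else c))) + 1 else (if (PySem.Int.mod i 10 = 4 ∨ PySem.Int.mod i 10 = 5) ∧ a = 2 then (if (PySem.Int.mod i 10 = 2 ∨ PySem.Int.mod i 10 = 3) ∧ a = 1 then (if (PySem.Int.mod i 10 = 0 ∨ PySem.Int.mod i 10 = 1) ∧ a = 3 then c + 1 else c) + 1 else (if (PySem.Int.mod i 10 = 0 ∨ PySem.Int.mod i 10 = 1) ∧ a = 3 then c + 1 else c)) + 1 else (if (PySem.Int.mod i 10 = 2 ∨ PySem.Int.mod i 10 = 3) ∧ a = 1 then (if (PySem.Int.mod i 10 = 0 ∨ PySem.Int.mod i 10 = 1) ∧ a = 3 then c + 1 else c) + 1 else (if (PySem.Int.mod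 i 10 = 0 ∨ PySem.Int.mod i 10 = 1) ∧ a = 3 then c + 1 else c)))))
      = c + (if a = PySem.List.pyGetD [3, 3, 1, 1, 2, 2, 4, 4, 5, 5] (PySem.Int.mod i 10) 0 then 1 else 0) := by
  rw [PySem.Int.mod_eq_emod_of_pos (by norm_num)]
  have h : i % 10 = 0 ∨ i % 10 = 1 ∨ i % 10 = 2 ∨ i % 10 = 3 ∨ i % 10 = 4 ∨ i % 10 = 5 ∨ i % 10 = 6 ∨ i % 10 = 7 ∨ i % 10 = 8 ∨ i % 10 = 9 := by omega
  rcases h with h|h|h|h|h|h|h|h|h|h <;> rw [h] <;>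
    simp only [PySem.List.pyGetD_ofNat'] <;> norm_num <;>
    split_ifs <;> omega

-- A's counter loop over range(len(answers)) computes, for any start state, the per-pattern match counts.
lemma pv_fold (answers : List Int) (l : List Int) (c : Int × Int × Int) :
    l.foldl (solutionStepA answers) c
      = (c.1 + (l.countP (fun j => decide (PySem.List.pyGetD answers j 0
              = PySem.List.pyGetD [1, 2, 3, 4, 5] (PySem.Int.mod j 5) 0)) : Int),
         c.2.1 + (l.countP (fun j => decide (PySem.List.pyGetD answers j 0
              = PySem.List.pyGetD [2, 1, 2, 3, 2, 4, 2, 5] (PySem.Int.mod j 8) 0)) : Int),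
         c.2.2 + (l.countP (fun j => decide (PySem.List.pyGetD answers j 0
              = PySem.List.pyGetD [3, 3, 1, 1, 2, 2, 4, 4, 5, 5] (PySem.Int.mod j 10) 0)) : Int)) := by
  induction l generalizing c with
  | nil => simp
  | cons x t ih =>
    rw [List.foldl_cons, ih]
    simp only [List.countP_cons, solutionStepA]
    refine Prod.ext ?_ (Prod.ext ?_ ?_) <;> simp only [decide_eq_true_eq]
    · rw [pv_c1]; push_cast; split_ifs <;> omega
    · rw [pv_c2]; push_cast; split_ifs <;> omega
    · rw [pv_c3]; push_cast; split_ifs <;> omega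

-- Exactly one residue of a nodup list collects the pair (m, v): the single-hit sum.
lemma pv_single (l : List Int) (hnd : l.Nodup) (f : Int → Int) (m v : Int) (hm : m ∈ l) :
    (l.map (fun r => if ((m, v) : Int × Int) = (r, f r) then (1 : Int) else 0)).sum
      = if v = f m then 1 else 0 := by
  induction l with
  | nil => cases hm
  | cons a t ih =>
    simp only [List.map_cons, List.sum_cons]
    rcases List.mem_cons.mp hm with rfl | hmt
    · have ht : (t.map (fun r => if ((m, v) : Int × Int) = (r, f r) then (1 : Int) else 0)).sum = 0 := by
        apply List.sum_eq_zero
        intro y hy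
        rcases List.mem_map.mp hy with ⟨r, hr, rfl⟩
        have : m ≠ r := fun h => (List.nodup_cons.mp hnd).1 (h ▸ hr)
        simp [Prod.ext_iff, this]
      rw [ht, add_zero]
      simp [Prod.ext_iff]
    · have hma : m ≠ a := fun h => (List.nodup_cons.mp hnd).1 (h ▸ hmt)
      rw [ih (List.nodup_cons.mp hnd).2 hmt]
      simp [Prod.ext_iff, hma]

-- The 40 histogram lookups for residue function f sum to the count of matching (index, answer) pairs.
lemma pv_sum (l : List (Int × Int)) (f : Int → Int) :
    ((PySem.List.pyRange 0 40 1).map (fun r =>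
        (l.countP (fun x => decide (((PySem.Int.mod x.1 40, x.2) : Int × Int) = (r, f r))) : Int))).sum
      = (l.countP (fun x => decide (x.2 = f (PySem.Int.mod x.1 40))) : Int) := by
  induction l with
  | nil => simp
  | cons x t ih =>
    simp only [List.countP_cons]
    push_cast
    rw [PySem.List.sum_map_add_int, ih]
    have hmem : PySem.Int.mod x.1 40 ∈ PySem.List.pyRange 0 40 1 := by
      rw [PySem.List.mem_pyRange_one]
      exact ⟨PySem.Int.mod_nonneg x.1 (by norm_num), PySem.Int.mod_lt x.1 (by norm_num)⟩
    have hs := pv_single (PySem.List.pyRange 0 40 1) (PySem.List.nodup_pyRange_one 0 40) f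
      (PySem.Int.mod x.1 40) x.2 hmem
    simp only [decide_eq_true_eq]
    rw [hs]

-- The histogram fold is Counter of the mapped pairs, so each lookup is a count.
lemma pv_hist (l : List (Int × Int)) (key : Int × Int) :
    (l.foldl
        (fun d x => d.insert (PySem.Int.mod x.1 40, x.2) (d.getD (PySem.Int.mod x.1 40, x.2) 0 + 1))
        (PySem.Dict.empty : PySem.Dict (Int × Int) Int)).getD key 0
      = (l.countP
          (fun x => decide (((PySem.Int.mod x.1 40, x.2) : Int × Int) = key)) : Int) := by
  have h : l.foldl
        (fun d x => d.insert (PySem.Int.mod x.1 40, x.2) (d.getD (PySem.Int.mod x.1 40, x.2) 0 + 1))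
        (PySem.Dict.empty : PySem.Dict (Int × Int) Int)
      = (l.map (fun x => ((PySem.Int.mod x.1 40, x.2) : Int × Int))).foldl
          (fun d y => d.insert y (d.getD y 0 + 1)) PySem.Dict.empty := by
    rw [List.foldl_map]
  rw [h, PySem.Dict.foldl_insert_getD_add_one_eq_counter, PySem.Dict.getD_counter,
      List.count_eq_countP, List.countP_map]
  norm_num [Function.comp_def]
  exact List.countP_congr fun x _ => by simp

-- Python's i % 40 % L = i % L when L divides 40 (all three pattern periods do).
lemma pv_modmod (i L : Int) (hL : 0 < L) (hd : L ∣ 40) :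
    PySem.Int.mod (PySem.Int.mod i 40) L = PySem.Int.mod i L := by
  rw [PySem.Int.mod_eq_emod_of_pos hL, PySem.Int.mod_eq_emod_of_pos (show (0:Int) < 40 by norm_num),
      PySem.Int.mod_eq_emod_of_pos hL]
  exact Int.emod_emod_of_dvd i hd

-- B's score for a pattern equals the count of matching (index, answer) pairs.
lemma pv_score (answers : List Int) (p : List Int) (hL : 0 < PySem.List.len p)
    (hd : PySem.List.len p ∣ 40) :
    ((PySem.List.pyRange 0 40 1).map (fun r =>
        ((PySem.List.enumerate answers).foldl
            (fun d x => d.insert (PySem.Int.mod x.1 40, x.2) (d.getD (PySem.Int.mod x.1 40, x.2) 0 + 1))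
            (PySem.Dict.empty : PySem.Dict (Int × Int) Int)).getD (r, PySem.List.pyGetD p (PySem.Int.mod r (PySem.List.len p)) 0) 0)).sum
      = ((PySem.List.enumerate answers).countP
          (fun x => decide (x.2 = PySem.List.pyGetD p (PySem.Int.mod x.1 (PySem.List.len p)) 0)) : Int) := by
  have h1 : ∀ r, ((PySem.List.enumerate answers).foldl
        (fun d x => d.insert (PySem.Int.mod x.1 40, x.2) (d.getD (PySem.Int.mod x.1 40, x.2) 0 + 1))
        (PySem.Dict.empty : PySem.Dict (Int × Int) Int)).getD (r, PySem.List.pyGetD p (PySem.Int.mod r (PySem.List.len p)) 0) 0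
      = ((PySem.List.enumerate answers).countP (fun x =>
          decide (((PySem.Int.mod x.1 40, x.2) : Int × Int)
            = (r, PySem.List.pyGetD p (PySem.Int.mod r (PySem.List.len p)) 0))) : Int) :=
    fun r => pv_hist (PySem.List.enumerate answers) _
  rw [List.map_congr_left (fun r _ => h1 r),
      pv_sum (PySem.List.enumerate answers) (fun r => PySem.List.pyGetD p (PySem.Int.mod r (PySem.List.len p)) 0)]
  congr 1
  apply List.countP_congr
  intro x _
  rw [pv_modmod x.1 (PySem.List.len p) hL hd]

-- The winner-selection stage: A's range(3) loop over temp equals B's filterMap over enumerate(scores).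
lemma pv_final (n1 n2 n3 : Int) :
    (PySem.List.pyRange 0 3 1).foldl
        (fun ans i => if PySem.List.pyGetD [n1, n2, n3] i 0 = max n1 (max n2 n3) then ans ++ [i + 1] else ans) []
      = (PySem.List.enumerate [n1, n2, n3]).filterMap
          (fun ic => if ic.2 = (PySem.List.max? [n1, n2, n3] (fun x => x)).getD 0 then some (ic.1 + 1) else none) := by
  have hm : (PySem.List.max? [n1, n2, n3] (fun x => x)).getD 0 = max n1 (max n2 n3) := by
    rw [PySem.List.max?_id_cons]
    simp [max_assoc]
  have hr : PySem.List.pyRange 0 3 1 = [0, 1, 2] := by decide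
  rw [hm, hr]
  simp only [List.foldl, PySem.List.enumerate_cons, PySem.List.enumerate_nil, List.filterMap,
    PySem.List.pyGetD_ofNat']
  norm_num
  split_ifs <;> simp

-- ===== VERDICT (by name: the statement is the Claim_ definition above) =====
theorem solution_spec : Claim_equal_solution := by
  intro answers _
  show solution answers = solution_alt answers
  unfold solution solution_alt solutionPatterns
  simp only [List.map_cons, List.map_nil]
  simp only [pv_score answers [1, 2, 3, 4, 5] (by decide) (by decide),
      pv_score answers [2, 1, 2, 3, 2, 4, 2, 5] (by decide) (by decide),
      pv_score answers [3, 3, 1, 1, 2, 2, 4, 4, 5, 5] (by decide) (by decide)]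
  rw [PySem.List.enumerate_eq_map_pyRange answers 0]
  simp only [List.countP_map]
  norm_num [pv_fold]
  exact pv_final _ _ _
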